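-- pv_equiv track=rewrite | github.com/mintboyyy/worksforksbrokes | PR2.py | SumDate
-- ===== SOURCE A (Python) =====
-- def SumDate(day):
--     sum = 0
--     for i in range(day+1):
--         if i<10:
--             sum = sum + i
--         else:
--             Days = str(i)
--             ListDays = list(Days)
--             sum = sum + int(ListDays[0]) + int(ListDays[1])
--     return sum
-- ===== SOURCE B (Python) =====
-- def _f(t):
--     # digit sum of the two-digit number t (10 <= t <= 99)
--     return t // 10 + t % 10
--
--
-- def _G(n):
--     # sum of _f(t) for t = 10 .. n, in closed form (0 if n < 10)
--     if n < 10: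
--         return 0
--     full, r = divmod(n, 10)
--     return 5 * full * (full - 1) + 45 * (full - 1) + (r + 1) * full + r * (r + 1) // 2
--
--
-- def SumDate(day):
--     if day < 0:
--         return 0
--     m = min(day, 9)
--     total = m * (m + 1) // 2
--     p = 1
--     while 10 * p <= day:
--         # segment of (k+2)-digit numbers: i in [10*p, min(day, 100*p - 1)], p = 10**k;
--         # each i contributes _f(i // p), constant on blocks of length p
--         hi = min(day, 100 * p - 1)
--         q = hi // p
--         total += p * _G(q - 1) + (hi - q * p + 1) * _f(q)
--         p *= 10
--     return total
-- ===== Notes on version B (the rewrite author's own statement) =====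
-- stated objective: faster
-- what changed: Replaces the per-day loop with string conversion by a closed-form arithmetic formula per digit-length segment (sum of two-digit prefixes computed from floor divisions), O(log day) instead of O(day).
import Mathlib
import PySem

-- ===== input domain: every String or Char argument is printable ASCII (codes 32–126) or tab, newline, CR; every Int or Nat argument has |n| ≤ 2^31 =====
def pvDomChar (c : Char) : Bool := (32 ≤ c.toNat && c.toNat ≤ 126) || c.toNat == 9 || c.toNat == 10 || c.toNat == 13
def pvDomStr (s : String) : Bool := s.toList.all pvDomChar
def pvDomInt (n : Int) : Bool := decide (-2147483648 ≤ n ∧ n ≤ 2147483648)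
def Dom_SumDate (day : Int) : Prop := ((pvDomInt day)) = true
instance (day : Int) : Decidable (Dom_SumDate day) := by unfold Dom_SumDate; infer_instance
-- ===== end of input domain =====

-- B replaces A's per-day loop with string conversion by closed-form arithmetic per
-- digit-length segment (objective: faster, O(log day) instead of O(day)).

-- ===== PORT A =====
-- for i in range(day+1): if i<10: sum += i else: sum += int(str(i)[0]) + int(str(i)[1])
-- (the `.getD 0` defaults are unreachable: for i ≥ 10, str(i) has ≥ 2 digit chars, so the
--  indexings and int() conversions always succeed)
def SumDate (day : Int) : Int :=
  (PySem.List.pyRange 0 (day + 1) 1).foldl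
    (fun sum i =>
      if i < 10 then sum + i
      else
        let ListDays := PySem.Int.toChars i     -- list(str(i))
        sum + ((PySem.List.pyGet? ListDays 0).bind (fun c => PySem.Int.ofChars? [c])).getD 0
            + ((PySem.List.pyGet? ListDays 1).bind (fun c => PySem.Int.ofChars? [c])).getD 0) 0

-- ===== PORT B =====
-- _f(t) = t // 10 + t % 10
def pvF (t : Int) : Int := PySem.Int.floordiv t 10 + PySem.Int.mod t 10

-- _G(n) = closed-form sum of _f(t) for t = 10..n (0 if n < 10)
def pvG (n : Int) : Int :=
  if n < 10 then 0
  else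
    let full := PySem.Int.floordiv n 10
    let r := PySem.Int.mod n 10
    5 * full * (full - 1) + 45 * (full - 1) + (r + 1) * full + PySem.Int.floordiv (r * (r + 1)) 2

-- the while-loop of Source B; the `0 < p` conjunct only makes the recursion total
-- (the loop is always entered with p ≥ 1, where it is vacuous)
def pvLoop (day p total : Int) : Int :=
  if h : 0 < p ∧ 10 * p ≤ day then
    let hi := min day (100 * p - 1)
    let q := PySem.Int.floordiv hi p
    pvLoop day (10 * p) (total + p * pvG (q - 1) + (hi - q * p + 1) * pvF q)
  else total
termination_by (day + 1 - p).toNat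
decreasing_by omega

def SumDate_alt (day : Int) : Int :=
  if day < 0 then 0
  else
    let m := min day 9
    pvLoop day 1 (PySem.Int.floordiv (m * (m + 1)) 2)

-- ===== PRECONDITION & SPEC =====
def Spec_SumDate (day : Int) (out : Int) : Prop := out = SumDate_alt day
instance (day : Int) (out : Int) : Decidable (Spec_SumDate day out) := by unfold Spec_SumDate; infer_instance

-- ===== CLAIM (what is proved, stated in full; the proofs are below) =====
def Claim_equal_SumDate : Prop := ∀ (day : Int), Dom_SumDate day → Spec_SumDate day (SumDate day)

-- ===== LEMMAS AND PROOFS =====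

-- decimal digit list of n (str(n) for n ≥ 0), recursively
def pvD (n : Nat) : List Char :=
  if n < 10 then [Nat.digitChar n] else pvD (n / 10) ++ [Nat.digitChar (n % 10)]
decreasing_by exact Nat.div_lt_self (by omega) (by omega)

-- the two-digit prefix of n
def prefN (n : Nat) : Nat := if n < 100 then n else prefN (n / 10)
decreasing_by exact Nat.div_lt_self (by omega) (by omega)

-- digit sum of a two-digit number
def fN (t : Nat) : Int := ((t / 10 : Nat) : Int) + ((t % 10 : Nat) : Int)

-- sum of fN over 10..n
def FS (n : Nat) : Int := ((List.range' 10 (n + 1 - 10)).map fN).sum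

-- the per-day contribution in A
def gN (n : Nat) : Int := if n < 10 then (n : Int) else fN (prefN n)

theorem toDigitsCore_eq_pvD (f : Nat) : ∀ (n : Nat) (acc : List Char), n < f →
    Nat.toDigitsCore 10 f n acc = pvD n ++ acc := by
  induction f with
  | zero => intro n acc h; omega
  | succ f ih =>
    intro n acc h
    rw [Nat.toDigitsCore]
    by_cases h10 : n < 10
    · have : n / 10 = 0 := Nat.div_eq_of_lt h10
      simp only [this]
      rw [pvD, if_pos h10, Nat.mod_eq_of_lt h10]
      simp
    · have hne : ¬ (n / 10 = 0) := by
        intro hz; exact h10 (by omega : n < 10)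
      rw [if_neg hne]
      rw [ih (n / 10) (Nat.digitChar (n % 10) :: acc) (by omega)]
      conv_rhs => rw [pvD, if_neg h10]
      simp

theorem toDigits_eq_pvD (n : Nat) : Nat.toDigits 10 n = pvD n := by
  have h := toDigitsCore_eq_pvD (n + 1) n [] (by omega)
  rw [Nat.toDigits, h, List.append_nil]

theorem prefN_lt_100 (n : Nat) : prefN n < 100 := by
  induction n using Nat.strong_induction_on with
  | _ n ih =>
    rw [prefN]
    by_cases h : n < 100
    · simp [h]
    · simpa [h] using ih (n / 10) (Nat.div_lt_self (by omega) (by omega))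

theorem pvD_two (n : Nat) (h : 10 ≤ n) :
    ∃ rest, pvD n = Nat.digitChar (prefN n / 10) :: Nat.digitChar (prefN n % 10) :: rest := by
  induction n using Nat.strong_induction_on with
  | _ n ih =>
    rw [pvD, if_neg (by omega)]
    by_cases h100 : n < 100
    · rw [prefN, if_pos h100]
      rw [pvD, if_pos (by omega : n / 10 < 10)]
      exact ⟨[], rfl⟩
    · obtain ⟨rest, hrest⟩ := ih (n / 10) (Nat.div_lt_self (by omega) (by omega))
        (by omega : 10 ≤ n / 10)
      rw [prefN, if_neg h100, hrest]
      exact ⟨rest ++ [Nat.digitChar (n % 10)], rfl⟩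

theorem ofChars_digitChar : ∀ d < 10, PySem.Int.ofChars? [Nat.digitChar d] = some (d : Int) := by
  decide

theorem pvG_eq_FS : ∀ n < 100, pvG (n : Nat) = FS n := by
  set_option maxRecDepth 10000 in decide

theorem FS_step (q : Nat) (h : 10 ≤ q) : FS q = FS (q - 1) + fN q := by
  unfold FS
  have h1 : q + 1 - 10 = (q - 10) + 1 := by omega
  have h2 : q - 1 + 1 - 10 = q - 10 := by omega
  rw [h1, h2, List.range'_concat]
  have h3 : 10 + 1 * (q - 10) = q := by omega
  rw [h3]
  simp

-- A's per-iteration contribution for i ≥ 10: the two leading decimal digits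
theorem body_eq (n : Nat) (hn : 10 ≤ n) (acc : Int) :
    (let ListDays := PySem.Int.toChars (n : Int)
     acc + ((PySem.List.pyGet? ListDays 0).bind (fun c => PySem.Int.ofChars? [c])).getD 0
         + ((PySem.List.pyGet? ListDays 1).bind (fun c => PySem.Int.ofChars? [c])).getD 0)
      = acc + gN n := by
  have htc : PySem.Int.toChars (n : Int) = pvD n := by
    unfold PySem.Int.toChars
    rw [if_neg (by omega : ¬ ((n : Int) < 0)), Int.toNat_natCast]
    exact toDigits_eq_pvD n
  obtain ⟨rest, hrest⟩ := pvD_two n hn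
  have hpre := prefN_lt_100 n
  have hd1 : prefN n / 10 < 10 := by omega
  have hd2 : prefN n % 10 < 10 := Nat.mod_lt _ (by omega)
  simp only [htc, hrest]
  have hg0 : PySem.List.pyGet?
      (Nat.digitChar (prefN n / 10) :: Nat.digitChar (prefN n % 10) :: rest) 0
      = some (Nat.digitChar (prefN n / 10)) := by
    simp [PySem.List.pyGet?, PySem.List.pyIdx?]
    rw [if_pos (by positivity)]
    simp
  have hg1 : PySem.List.pyGet?
      (Nat.digitChar (prefN n / 10) :: Nat.digitChar (prefN n % 10) :: rest) 1
      = some (Nat.digitChar (prefN n % 10)) := by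
    simp [PySem.List.pyGet?, PySem.List.pyIdx?]
  rw [hg0, hg1]
  simp only [Option.bind_some, ofChars_digitChar _ hd1,
    ofChars_digitChar _ hd2, Option.getD_some]
  simp only [gN, if_neg (show ¬ n < 10 by omega), fN]
  ring

-- A's loop computes the sum of gN over 0..day
theorem A_eq_sum (day : Int) (h : 0 ≤ day) :
    SumDate day = ((List.range (day.toNat + 1)).map gN).sum := by
  unfold SumDate
  obtain ⟨d, rfl⟩ : ∃ d : Nat, day = (d : Int) := ⟨day.toNat, (Int.toNat_of_nonneg h).symm⟩
  have h1 : (d : Int) + 1 = ((d + 1 : Nat) : Int) := by push_cast; ring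
  rw [h1, PySem.List.pyRange_zero_natCast, List.foldl_map]
  rw [PySem.List.foldl_congr_mem _ _ (fun (acc : Int) (n : Nat) => acc + gN n) 0 ?_]
  · rw [PySem.List.foldl_add]
    simp
  · intro acc n _
    by_cases hlt : n < 10
    · rw [if_pos (by exact_mod_cast hlt)]
      simp [gN, hlt]
    · rw [if_neg (by exact_mod_cast hlt)]
      exact body_eq n (by omega) acc

theorem prefN_div : ∀ (k n : Nat), 10 * 10 ^ k ≤ n → n < 100 * 10 ^ k → prefN n = n / 10 ^ k := by
  intro k
  induction k with
  | zero => intro n h1 h2; rw [prefN, if_pos (by omega)]; simp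
  | succ k ih =>
    intro n h1 h2
    have hp1 : (1:Nat) ≤ 10 ^ k := Nat.one_le_pow _ _ (by omega)
    rw [pow_succ] at h1 h2
    rw [prefN, if_neg (by omega : ¬ n < 100)]
    rw [ih (n / 10) (by rw [Nat.le_div_iff_mul_le (by omega : 0 < 10)]; omega)
      (by rw [Nat.div_lt_iff_lt_mul (by omega : 0 < 10)]; omega)]
    rw [Nat.div_div_eq_div_mul, pow_succ, Nat.mul_comm 10 (10 ^ k)]

theorem seg_closed (p : Nat) (hp : 0 < p) : ∀ hi, 10 * p ≤ hi → hi < 100 * p →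
    ((List.range' (10 * p) (hi + 1 - 10 * p)).map (fun i => fN (i / p))).sum
      = (p : Int) * FS (hi / p - 1) + ((hi : Int) - ((hi / p : Nat) : Int) * p + 1) * fN (hi / p) := by
  intro hi hlo
  induction hi, hlo using Nat.le_induction with
  | base =>
    intro _
    have h1 : 10 * p + 1 - 10 * p = 1 := by omega
    have h2 : List.range' (10 * p) 1 = [10 * p] := by simp [List.range']
    have hq : 10 * p / p = 10 := Nat.mul_div_cancel 10 hp
    rw [h1, h2]
    simp only [List.map_cons, List.map_nil, List.sum_cons, List.sum_nil, hq]
    have hFS : FS (10 - 1) = 0 := by decide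
    have hfN : fN 10 = 1 := by decide
    rw [hFS, hfN]
    push_cast
    ring
  | succ hi hge ih =>
    intro hlt
    have ihv := ih (by omega)
    have h1 : hi + 1 + 1 - 10 * p = (hi + 1 - 10 * p) + 1 := by omega
    rw [h1, List.range'_concat]
    have h2 : 10 * p + 1 * (hi + 1 - 10 * p) = hi + 1 := by omega
    rw [h2, List.map_append, List.sum_append, ihv]
    simp only [List.map_cons, List.map_nil, List.sum_cons, List.sum_nil, add_zero]
    rw [Nat.succ_div]
    by_cases hdvd : p ∣ hi + 1
    · rw [if_pos hdvd]
      set q := hi / p with hqdef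
      have hq10 : 10 ≤ q := (Nat.le_div_iff_mul_le hp).mpr (by omega)
      obtain ⟨c, hc⟩ := hdvd
      have hc1 : 0 < c := by
        rcases Nat.eq_zero_or_pos c with h0 | h
        · rw [h0, Nat.mul_zero] at hc; omega
        · exact h
      have hms : p * (c - 1) + p = p * c := by
        rw [← Nat.mul_succ]; congr 1; omega
      have hq1 : hi = p * (c - 1) + (p - 1) := by omega
      have hqc : q = c - 1 := by
        rw [hqdef, hq1, Nat.mul_add_div hp, Nat.div_eq_of_lt (by omega : p - 1 < p), Nat.add_zero]
      have hNat : hi + 1 = (q + 1) * p := by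
        rw [hqc, Nat.mul_comm]
        have hcc : c - 1 + 1 = c := by omega
        rw [hcc]; exact hc
      have hZ : ((hi : Int) + 1) = ((q : Nat) : Int) * p + p := by
        have := congrArg (Nat.cast (R := Int)) hNat
        push_cast at this
        linarith
      have hsub : q + 1 - 1 = q := by omega
      rw [hsub, FS_step q hq10]
      push_cast
      linear_combination (fN q - fN (q + 1)) * hZ
    · rw [if_neg hdvd]
      simp only [Nat.add_zero]
      push_cast
      ring

theorem pvF_cast (m : Nat) : pvF ((m : Nat) : Int) = fN m := by
  unfold pvF fN
  rw [PySem.Int.floordiv_eq_ediv_of_pos (by omega), PySem.Int.mod_eq_emod_of_pos (by omega)]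
  push_cast
  ring

theorem pvLoop_eq_aux : ∀ (j k : Nat) (day total : Int), 0 ≤ day → day.toNat < 10 ^ k * 10 ^ j →
    pvLoop day ((10:Int) ^ k) total
      = total + ((List.range' (10 * 10 ^ k) (day.toNat + 1 - 10 * 10 ^ k)).map gN).sum := by
  intro j
  induction j with
  | zero =>
    intro k day total h0 hb
    simp only [pow_zero, Nat.mul_one] at hb
    have hpk : (0:Int) < 10 ^ k := by positivity
    have hcast : (((10 ^ k : Nat) : Nat) : Int) = (10:Int) ^ k := by push_cast; ring
    have hguard : ¬ (0 < (10:Int)^k ∧ 10 * (10:Int)^k ≤ day) := by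
      rintro ⟨-, hle⟩
      have hdi : (day.toNat : Int) = day := Int.toNat_of_nonneg h0
      have h4 : ((10 ^ k : Nat) : Int) ≤ (day.toNat : Int) := by
        rw [hcast, hdi]; nlinarith [hpk]
      have h5 : 10 ^ k ≤ day.toNat := by exact_mod_cast h4
      omega
    rw [pvLoop, dif_neg hguard]
    have hlen : day.toNat + 1 - 10 * 10 ^ k = 0 := by
      have : (0:Nat) < 10 ^ k := by positivity
      omega
    rw [hlen]
    simp
  | succ j ih =>
    intro k day total h0 hb
    by_cases hguard : 0 < (10:Int)^k ∧ 10 * (10:Int)^k ≤ day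
    · rw [pvLoop, dif_pos hguard]
      have hdi : (day.toNat : Int) = day := Int.toNat_of_nonneg h0
      have hpNpos : 0 < (10:Nat) ^ k := by positivity
      have hpcast : (((10 ^ k : Nat)) : Int) = (10:Int) ^ k := by push_cast; ring
      have h10p : 10 * 10 ^ k ≤ day.toNat := by
        have h2 := hguard.2
        rw [← hdi, ← hpcast] at h2
        exact_mod_cast h2
      have h100 : ((100 * 10 ^ k - 1 : Nat) : Int) = 100 * (10:Int) ^ k - 1 := by
        push_cast [Nat.cast_sub (show 1 ≤ 100 * 10 ^ k by omega)]
        ring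
      have hhi : min day (100 * (10:Int)^k - 1) = ((min day.toNat (100 * 10 ^ k - 1) : Nat) : Int) := by
        rw [Nat.cast_min, h100, hdi]
      have hq10 : 10 ≤ min day.toNat (100 * 10 ^ k - 1) / 10 ^ k := by
        apply (Nat.le_div_iff_mul_le hpNpos).mpr
        omega
      have hq99 : min day.toNat (100 * 10 ^ k - 1) / 10 ^ k ≤ 99 := by
        apply Nat.le_of_lt_succ
        apply (Nat.div_lt_iff_lt_mul hpNpos).mpr
        omega
      have hqcast : PySem.Int.floordiv ((min day.toNat (100 * 10 ^ k - 1) : Nat) : Int) ((10:Int)^k)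
          = ((min day.toNat (100 * 10 ^ k - 1) / 10 ^ k : Nat) : Int) := by
        rw [← hpcast]
        exact_mod_cast PySem.Int.floordiv_natCast _ _
      have hGcast : pvG (((min day.toNat (100 * 10 ^ k - 1) / 10 ^ k : Nat) : Int) - 1)
          = FS (min day.toNat (100 * 10 ^ k - 1) / 10 ^ k - 1) := by
        have h1 : (((min day.toNat (100 * 10 ^ k - 1) / 10 ^ k : Nat) : Int) - 1)
            = ((min day.toNat (100 * 10 ^ k - 1) / 10 ^ k - 1 : Nat) : Int) := by
          push_cast [Nat.cast_sub (by omega : 1 ≤ min day.toNat (100 * 10 ^ k - 1) / 10 ^ k)]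
          ring
        rw [h1]
        exact pvG_eq_FS _ (by omega)
      rw [hhi]
      simp only [hqcast, hGcast, pvF_cast]
      have hpow : (10:Int) * 10 ^ k = 10 ^ (k + 1) := by ring
      rw [hpow]
      rw [ih (k + 1) day _ h0 (by
        have h9 : (10:Nat) ^ k * 10 ^ (j + 1) = 10 ^ (k + 1) * 10 ^ j := by ring
        omega)]
      -- the segment term equals the sum of gN over [10*10^k, hi]
      have hseg := seg_closed (10 ^ k) hpNpos (min day.toNat (100 * 10 ^ k - 1))
        (by omega) (by omega)
      have hmap : (List.map (fun i => fN (i / 10 ^ k))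
            (List.range' (10 * 10 ^ k) (min day.toNat (100 * 10 ^ k - 1) + 1 - 10 * 10 ^ k)))
          = List.map gN
            (List.range' (10 * 10 ^ k) (min day.toNat (100 * 10 ^ k - 1) + 1 - 10 * 10 ^ k)) := by
        apply List.map_congr_left
        intro i hi
        rw [List.mem_range'_1] at hi
        have hi10 : 10 ≤ i := by
          have : 10 * 10 ^ k ≤ i := hi.1
          have h1 : (1:Nat) ≤ 10 ^ k := Nat.one_le_pow _ _ (by omega)
          omega
        rw [gN, if_neg (by omega)]
        rw [prefN_div k i hi.1 (by omega)]
      rw [hmap] at hseg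
      rw [← hpcast]
      by_cases hbig : 100 * 10 ^ k - 1 ≤ day.toNat
      · have hmin : min day.toNat (100 * 10 ^ k - 1) = 100 * 10 ^ k - 1 := by omega
        rw [hmin] at hseg ⊢
        have hp : (10:Nat) ^ (k + 1) = 10 ^ k * 10 := by ring
        have h1 : 10 * 10 ^ (k + 1) = 10 * 10 ^ k + 1 * (100 * 10 ^ k - 1 + 1 - 10 * 10 ^ k) := by
          omega
        have hra : List.range' (10 * 10 ^ k) (100 * 10 ^ k - 1 + 1 - 10 * 10 ^ k) 1
              ++ List.range' (10 * 10 ^ (k + 1)) (day.toNat + 1 - 10 * 10 ^ (k + 1)) 1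
            = List.range' (10 * 10 ^ k) (day.toNat + 1 - 10 * 10 ^ k) 1 := by
          rw [h1, List.range'_append]
          congr 1
          omega
        have hsum : ((List.range' (10 * 10 ^ k) (100 * 10 ^ k - 1 + 1 - 10 * 10 ^ k)).map gN).sum
              + ((List.range' (10 * 10 ^ (k + 1)) (day.toNat + 1 - 10 * 10 ^ (k + 1))).map gN).sum
            = ((List.range' (10 * 10 ^ k) (day.toNat + 1 - 10 * 10 ^ k)).map gN).sum := by
          rw [← hra, List.map_append, List.sum_append]
        linarith [hseg, hsum]
      · have hmin : min day.toNat (100 * 10 ^ k - 1) = day.toNat := by omega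
        rw [hmin] at hseg ⊢
        have hp : (10:Nat) ^ (k + 1) = 10 ^ k * 10 := by ring
        have hlen0 : day.toNat + 1 - 10 * 10 ^ (k + 1) = 0 := by omega
        rw [hlen0]
        simp only [List.range'_zero, List.map_nil, List.sum_nil, add_zero]
        linarith [hseg]
    · rw [pvLoop, dif_neg hguard]
      have hpk : (0:Int) < 10 ^ k := by positivity
      have hle : ¬ (10 * (10:Int)^k ≤ day) := fun h => hguard ⟨hpk, h⟩
      have hlen : day.toNat + 1 - 10 * 10 ^ k = 0 := by
        have hdi : (day.toNat : Int) = day := Int.toNat_of_nonneg h0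
        have hpcast : (((10 ^ k : Nat)) : Int) = (10:Int) ^ k := by push_cast; ring
        have : ¬ ((10 * (10 ^ k : Nat) : Nat) : Int) ≤ (day.toNat : Int) := by
          push_cast
          rw [hdi]
          exact_mod_cast hle
        have h5 : ¬ 10 * 10 ^ k ≤ day.toNat := by exact_mod_cast this
        omega
      rw [hlen]
      simp

-- ===== VERDICT (by name: the statement is the Claim_ definition above) =====
theorem SumDate_spec : Claim_equal_SumDate := by
  intro day hdom
  unfold Spec_SumDate
  have hbound : day ≤ 2147483648 := by
    unfold Dom_SumDate pvDomInt at hdom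
    exact (of_decide_eq_true hdom).2
  by_cases hneg : day < 0
  · unfold SumDate SumDate_alt
    rw [if_pos hneg]
    have hempty : PySem.List.pyRange 0 (day + 1) 1 = [] := by
      have : day + 1 = ((0:Nat) : Int) + (day + 1 - 0) ∧ day + 1 ≤ 0 := by omega
      simp [PySem.List.pyRange]
      omega
    rw [hempty]
    rfl
  · rw [not_lt] at hneg
    by_cases hsmall : day < 10
    · unfold SumDate_alt
      rw [if_neg (by omega)]
      rw [pvLoop, dif_neg (by rintro ⟨-, h2⟩; omega)]
      have hm : min day 9 = day := by omega
      rw [hm]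
      interval_cases day <;> decide
    · rw [A_eq_sum day hneg]
      unfold SumDate_alt
      rw [if_neg (by omega)]
      have hm : min day 9 = 9 := by omega
      simp only [hm]
      have htri : PySem.Int.floordiv (9 * (9 + 1)) 2 = 45 := by decide
      rw [htri]
      have h1 : (1:Int) = (10:Int) ^ 0 := by norm_num
      conv_rhs => rw [h1]
      rw [pvLoop_eq_aux 32 0 day 45 hneg (by
        have h2 : day.toNat ≤ 2147483648 := by omega
        have h3 : (2147483648:Nat) < 10 ^ 0 * 10 ^ 32 := by norm_num
        omega)]
      have hd10 : 10 ≤ day.toNat := by omega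
      have hsplit : List.range' 0 10 1 ++ List.range' 10 (day.toNat + 1 - 10) 1
          = List.range' 0 (day.toNat + 1) 1 := by
        have h4 : (10:Nat) = 0 + 1 * 10 := by omega
        conv_lhs => rw [h4, List.range'_append]
        congr 1
        omega
      rw [List.range_eq_range', ← hsplit, List.map_append, List.sum_append]
      have h45 : ((List.range' 0 10 1).map gN).sum = 45 := by decide
      rw [h45]
      simp [pow_zero]
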